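-- pv_equiv track=rewrite | github.com/karelinas/adventofcode2021 | day15.py | sideways_expansion
-- ===== SOURCE A (Python) =====
-- from itertools import chain
--
-- def sideways_expansion(grid):
--     return [
--         list(
--             chain(
--                 line,
--                 *[
--                     [(line[n] + m - 1) % 9 + 1 for n in range(len(line))]
--                     for m in range(1, 5)
--                 ]
--             )
--         )
--         for line in grid
--     ]
-- ===== SOURCE B (Python) =====
-- def sideways_expansion(grid):
--     out = []
--     for line in grid:
--         row = list(line)
--         block = list(line)
--         for _ in range(4):
--             block = [v % 9 + 1 for v in block]
--             row.extend(block)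
--         out.append(row)
--     return out
-- ===== Notes on version B (the rewrite author's own statement) =====
-- stated objective: faster
-- what changed: Each of the four extra tiles is built incrementally from the previous tile by one v % 9 + 1 step, instead of A's recomputation of every tile from the original line via (v + m - 1) % 9 + 1 through range/indexing and chain.
import Mathlib
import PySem

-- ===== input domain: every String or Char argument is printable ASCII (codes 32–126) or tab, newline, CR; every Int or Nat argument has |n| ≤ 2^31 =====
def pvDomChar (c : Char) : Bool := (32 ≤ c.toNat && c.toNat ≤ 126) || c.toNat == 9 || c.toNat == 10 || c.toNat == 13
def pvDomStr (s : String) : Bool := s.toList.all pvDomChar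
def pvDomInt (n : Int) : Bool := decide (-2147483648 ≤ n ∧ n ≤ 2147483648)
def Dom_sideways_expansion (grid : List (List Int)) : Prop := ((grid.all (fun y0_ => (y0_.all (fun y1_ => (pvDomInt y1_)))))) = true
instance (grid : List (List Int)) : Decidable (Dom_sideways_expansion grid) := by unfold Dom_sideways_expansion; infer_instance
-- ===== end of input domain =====

-- B builds each of the four extra tiles incrementally from the previous tile (v % 9 + 1),
-- instead of A's independent recomputation of every tile from the original line.


-- ===== PORT A =====
def sideways_expansion (grid : List (List Int)) : List (List Int) :=
  grid.map (fun line =>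
    line ++ (PySem.List.pyRange 1 5 1).flatMap (fun m =>
      (PySem.List.pyRange 0 (line.length : Int) 1).map (fun n =>
        PySem.Int.mod (PySem.List.pyGetD line n 0 + m - 1) 9 + 1)))

-- ===== PORT B =====
def pvStep (block : List Int) : List Int := block.map (fun v => PySem.Int.mod v 9 + 1)

def pvRow (line : List Int) : List Int :=
  ((List.range 4).foldl (fun (st : List Int × List Int) _ =>
    let b := pvStep st.2; (st.1 ++ b, b)) (line, line)).1

def sideways_expansion_alt (grid : List (List Int)) : List (List Int) :=
  grid.map pvRow

-- ===== PRECONDITION & SPEC =====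
def Spec_sideways_expansion (grid : List (List Int)) (out : List (List Int)) : Prop := out = sideways_expansion_alt grid
instance (grid : List (List Int)) (out : List (List Int)) : Decidable (Spec_sideways_expansion grid out) := by unfold Spec_sideways_expansion; infer_instance

-- ===== CLAIM (what is proved, stated in full; the proofs are below) =====
def Claim_equal_sideways_expansion : Prop := ∀ (grid : List (List Int)), Dom_sideways_expansion grid → Spec_sideways_expansion grid (sideways_expansion grid)

-- ===== LEMMAS AND PROOFS =====

-- tile m of A, as a plain map over the line
lemma tileA_eq (line : List Int) (m : Int) :
    (PySem.List.pyRange 0 (line.length : Int) 1).map (fun n =>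
        PySem.Int.mod (PySem.List.pyGetD line n 0 + m - 1) 9 + 1)
    = line.map (fun v => PySem.Int.mod (v + m - 1) 9 + 1) := by
  conv_rhs => rw [← PySem.List.map_pyGetD_pyRange_zero' (xs := line) (d := (0 : Int))]
  rw [List.map_map]
  rfl

lemma mod9 (a : Int) : PySem.Int.mod a 9 = a % 9 :=
  PySem.Int.mod_eq_emod_of_pos (by norm_num)

lemma row_eq (line : List Int) :
    line ++ (PySem.List.pyRange 1 5 1).flatMap (fun m =>
      (PySem.List.pyRange 0 (line.length : Int) 1).map (fun n =>
        PySem.Int.mod (PySem.List.pyGetD line n 0 + m - 1) 9 + 1))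
    = pvRow line := by
  have h1 : PySem.List.pyRange 1 5 1 = [1, 2, 3, 4] := by decide
  rw [h1]
  simp only [List.flatMap_cons, List.flatMap_nil, List.append_nil, tileA_eq]
  unfold pvRow
  simp only [List.range_succ, List.range_zero, List.nil_append, List.foldl_append,
    List.foldl_cons, List.foldl_nil]
  simp only [pvStep, List.map_map, List.append_assoc]
  refine congrArg (line ++ ·) ?_
  refine congr (congrArg _ ?_) (congr (congrArg _ ?_) (congr (congrArg _ ?_) ?_)) <;>
  · refine List.map_congr_left (fun v _ => ?_)
    simp only [Function.comp, mod9]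
    omega

-- ===== VERDICT (by name: the statement is the Claim_ definition above) =====
theorem sideways_expansion_spec : Claim_equal_sideways_expansion := by
  intro grid _
  unfold Spec_sideways_expansion sideways_expansion sideways_expansion_alt
  apply List.map_congr_left
  intro line _
  exact row_eq line
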